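-- pv_equiv track=rewrite | github.com/Tommylee1013/QUANTIFI | Week 10/AdvancedTimeSeries.py | lempel_ziv_lib
-- ===== SOURCE A (Python) =====
-- def lempel_ziv_lib(msg: str) -> list:
--     i, lib = 1, [msg[0]]
--     while i < len(msg):
--         for j in range(i, len(msg)):
--             msg_ = msg[i: j + 1]
--             if msg_ not in lib:
--                 lib.append(msg_)
--                 break
--         i = j + 1
--     return lib
-- ===== SOURCE B (Python) =====
-- def lempel_ziv_lib(msg: str) -> list:
--     lib = [msg[0]]
--     cur = ''
--     for ch in msg[1:]:
--         cur += ch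
--         if cur not in lib:
--             lib.append(cur)
--             cur = ''
--     return lib
-- ===== Notes on version B (the rewrite author's own statement) =====
-- stated objective: simpler
-- what changed: Replaces the nested while/for over indices with repeated slicing msg[i:j+1] by a single linear pass over msg[1:] that grows one accumulator string and resets it each time a new phrase is added.
import Mathlib
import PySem

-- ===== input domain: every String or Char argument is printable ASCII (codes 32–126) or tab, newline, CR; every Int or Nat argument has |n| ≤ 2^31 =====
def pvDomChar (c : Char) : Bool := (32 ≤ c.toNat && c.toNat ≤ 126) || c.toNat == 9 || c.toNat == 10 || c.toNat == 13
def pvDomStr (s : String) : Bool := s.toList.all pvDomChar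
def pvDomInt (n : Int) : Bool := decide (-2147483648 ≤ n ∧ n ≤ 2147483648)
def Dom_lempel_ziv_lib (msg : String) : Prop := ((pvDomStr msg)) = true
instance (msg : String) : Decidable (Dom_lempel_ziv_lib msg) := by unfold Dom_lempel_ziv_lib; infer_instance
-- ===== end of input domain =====

-- B replaces A's nested index loops with one linear accumulator pass over msg[1:]; objective: simpler.


-- ===== PORT A =====
-- Strings are carried as List Char during the computation (PySem style) and turned into
-- String only on return; list membership then coincides with Python's str equality.
-- Loops recurse on a fuel argument (a totality guard only: fuel = s.length always suffices,
-- the proofs below never reach 0 on admitted inputs).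
-- 'for j in range(i, len(msg)): msg_ = msg[i:j+1]; if msg_ not in lib: append; break':
-- returns the updated lib together with the value of 'i = j + 1' after the for loop
-- (when the for loop finishes without break, j = len-1 and i becomes s.length).
def lzA_inner (s : List Char) (lib : List (List Char)) (i : Nat) : Nat → Nat → List (List Char) × Nat
  | _, 0 => (lib, s.length)
  | j, fuel + 1 =>
    if j < s.length then
      let msg_ := PySem.List.slice s (some (i : Int)) (some ((j : Int) + 1))  -- msg[i : j+1]
      if msg_ ∈ lib then lzA_inner s lib i (j + 1) fuel
      else (lib ++ [msg_], j + 1)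
    else (lib, s.length)

-- the 'while i < len(msg)' loop of A
def lzA_while (s : List Char) : List (List Char) → Nat → Nat → List (List Char)
  | lib, _, 0 => lib
  | lib, i, fuel + 1 =>
    if i < s.length then
      let p := lzA_inner s lib i i s.length
      lzA_while s p.1 p.2 fuel
    else lib

def lempel_ziv_lib (msg : String) : List String :=
  match msg.toList with
  | [] => []        -- msg[0] raises IndexError; excluded by Pre_
  | c :: _ => (lzA_while msg.toList [[c]] 1 msg.toList.length).map (fun l => String.ofList l)

-- ===== PORT B =====
-- one loop body: cur += ch; if cur not in lib: lib.append(cur); cur = ''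
def lzB_step (st : List (List Char) × List Char) (ch : Char) : List (List Char) × List Char :=
  let cur := st.2 ++ [ch]
  if cur ∈ st.1 then (st.1, cur) else (st.1 ++ [cur], [])

def lempel_ziv_lib_alt (msg : String) : List String :=
  match msg.toList with
  | [] => []        -- msg[0] raises IndexError; excluded by Pre_
  | c :: rest => (rest.foldl lzB_step ([[c]], [])).1.map (fun l => String.ofList l)

-- ===== PRECONDITION & SPEC =====
-- A evaluates msg[0], which raises IndexError exactly on the empty string.
def Pre_lempel_ziv_lib (msg : String) : Prop := msg.toList ≠ []
instance (msg : String) : Decidable (Pre_lempel_ziv_lib msg) := by unfold Pre_lempel_ziv_lib; infer_instance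
def pvWitness_lempel_ziv_lib : String := "abcabcab"

def Spec_lempel_ziv_lib (msg : String) (out : List String) : Prop := out = lempel_ziv_lib_alt msg
instance (msg : String) (out : List String) : Decidable (Spec_lempel_ziv_lib msg out) := by unfold Spec_lempel_ziv_lib; infer_instance

-- ===== CLAIM (what is proved, stated in full; the proofs are below) =====
def Claim_equal_lempel_ziv_lib : Prop := ∀ (msg : String), Dom_lempel_ziv_lib msg → Pre_lempel_ziv_lib msg → Spec_lempel_ziv_lib msg (lempel_ziv_lib msg)

-- ===== LEMMAS AND PROOFS =====

-- with enough fuel, the inner for-loop leaves i strictly larger (it returns j+1 or s.length)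
theorem lzA_inner_snd_gt (s : List Char) (i : Nat) :
    ∀ fuel j lib, j < s.length → j < (lzA_inner s lib i j fuel).2 := by
  intro fuel
  induction fuel with
  | zero => intro j lib hj; simpa [lzA_inner] using hj
  | succ fuel ih =>
    intro j lib hj
    simp only [lzA_inner, if_pos hj]
    split
    · by_cases hj1 : j + 1 < s.length
      · have := ih (j + 1) lib hj1
        omega
      · cases fuel with
        | zero => simpa [lzA_inner] using hj
        | succ fuel => simp only [lzA_inner, if_neg hj1]; omega
    · simp

-- A's inner for-loop, started at j with accumulated segment msg[i:j], advances B's fold.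
theorem lzA_inner_bridge (s : List Char) (i : Nat) :
    ∀ fuel j lib, s.length - j ≤ fuel → i ≤ j →
      (List.foldl lzB_step (lib, (s.drop i).take (j - i)) (s.drop j)).1 =
      (List.foldl lzB_step ((lzA_inner s lib i j fuel).1, []) (s.drop (lzA_inner s lib i j fuel).2)).1 := by
  intro fuel
  induction fuel with
  | zero =>
    intro j lib hn hij
    have hj : s.length ≤ j := by omega
    simp only [lzA_inner]
    rw [List.drop_eq_nil_of_le hj, List.drop_eq_nil_of_le (le_refl s.length)]
    rfl
  | succ fuel ih =>
    intro j lib _hn hij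
    by_cases hj : j < s.length
    · -- one character s[j] is consumed on both sides
      have hdrop : s.drop j = s[j] :: s.drop (j + 1) := List.drop_eq_getElem_cons hj
      have hseg : (s.drop i).take (j - i) ++ [s[j]] = (s.drop i).take (j + 1 - i) := by
        have h1 : j + 1 - i = (j - i) + 1 := by omega
        rw [h1, List.take_add_one]
        have h2 : (s.drop i)[j - i]? = some s[j] := by
          rw [List.getElem?_drop]
          have : i + (j - i) = j := by omega
          rw [this, List.getElem?_eq_getElem hj]
        rw [h2]
        rfl
      have hslice : PySem.List.slice s (some (i : Int)) (some ((j : Int) + 1)) =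
          (s.drop i).take (j + 1 - i) := by
        have hc : ((j : Int) + 1) = (((j + 1 : Nat) : Int)) := by push_cast; ring
        rw [hc, PySem.List.slice_natCast]
      simp only [lzA_inner, if_pos hj, hslice]
      rw [hdrop, List.foldl_cons]
      unfold lzB_step
      simp only [hseg]
      by_cases hmem : (s.drop i).take (j + 1 - i) ∈ lib
      · simp only [if_pos hmem]
        have := ih (j + 1) lib (by omega) (by omega)
        have hs : (s.drop i).take (j + 1 - i) = (s.drop i).take ((j + 1) - i) := rfl
        rw [hs] at *
        exact this
      · simp only [if_neg hmem]
    · simp only [lzA_inner, if_neg hj]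
      rw [List.drop_eq_nil_of_le (by omega : s.length ≤ j),
          List.drop_eq_nil_of_le (le_refl s.length)]
      rfl

-- A's while loop computes the first component of B's fold over the remaining characters.
theorem lzA_while_bridge (s : List Char) :
    ∀ fuel i lib, s.length - i ≤ fuel →
      lzA_while s lib i fuel = (List.foldl lzB_step (lib, []) (s.drop i)).1 := by
  intro fuel
  induction fuel with
  | zero =>
    intro i lib hn
    simp only [lzA_while]
    rw [List.drop_eq_nil_of_le (by omega : s.length ≤ i)]
    rfl
  | succ fuel ih =>
    intro i lib hn
    by_cases h : i < s.length
    · simp only [lzA_while, if_pos h]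
      have hgt := lzA_inner_snd_gt s i (s.length) i lib h
      rw [ih (lzA_inner s lib i i s.length).2 (lzA_inner s lib i i s.length).1 (by omega)]
      have hbr := lzA_inner_bridge s i (s.length) i lib (by omega) (le_refl i)
      simp only [Nat.sub_self, List.take_zero] at hbr
      exact hbr.symm
    · simp only [lzA_while, if_neg h]
      rw [List.drop_eq_nil_of_le (by omega : s.length ≤ i)]
      rfl

-- ===== VERDICT (by name: the statement is the Claim_ definition above) =====
theorem lempel_ziv_lib_spec : Claim_equal_lempel_ziv_lib := by
  intro msg _ hpre
  unfold Spec_lempel_ziv_lib lempel_ziv_lib lempel_ziv_lib_alt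
  cases hm : msg.toList with
  | nil => exact absurd hm hpre
  | cons c rest =>
    show (lzA_while (c :: rest) [[c]] 1 (c :: rest).length).map (fun l => String.ofList l) =
      ((rest.foldl lzB_step ([[c]], [])).1).map (fun l => String.ofList l)
    rw [lzA_while_bridge (c :: rest) (c :: rest).length 1 [[c]] (by omega)]
    rfl
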